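-- pv_equiv track=rewrite | github.com/Nicolas-albu/OBI | 2018/escadinha.py | escadinha
-- ===== SOURCE A (Python) =====
-- def escadinha(N: int, sequência: list[int]):
--     if N <= 2:
--         return 1  # Qualquer sequência com 1 ou 2 números é uma escadinha
--
--     diferença_atual = sequência[1] - sequência[0]
--     quantidade_de_escadinhas_encontradas = 1
--
--     for valor in range(2, N):
--         if sequência[valor] - sequência[valor - 1] != diferença_atual:
--             diferença_atual = sequência[valor] - sequência[valor - 1]
--             quantidade_de_escadinhas_encontradas += 1
--
--     return quantidade_de_escadinhas_encontradas
-- ===== SOURCE B (Python) =====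
-- def escadinha(N: int, sequência: list[int]):
--     if N <= 2:
--         return 1  # Qualquer sequência com 1 ou 2 números é uma escadinha
--     # run-stripping: repeatedly locate the end of the maximal arithmetic run
--     # starting at `início`, count one run, and restart at its last element
--     quantidade = 1
--     início = 0
--     while True:
--         d = sequência[início + 1] - sequência[início]
--         j = início + 2
--         while j < N and sequência[j] - sequência[j - 1] == d:
--             j += 1
--         if j == N:
--             return quantidade
--         quantidade += 1
--         início = j - 1
-- ===== Notes on version B (the rewrite author's own statement) =====
-- stated objective: alternative
-- what changed: Replaces A's single index loop with a running current-difference state by a run-stripping two-level loop: an inner while scans to the end of the maximal arithmetic run starting at a cursor, the outer loop counts one run per iteration and restarts the cursor at that run's last element.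
import Mathlib
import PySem

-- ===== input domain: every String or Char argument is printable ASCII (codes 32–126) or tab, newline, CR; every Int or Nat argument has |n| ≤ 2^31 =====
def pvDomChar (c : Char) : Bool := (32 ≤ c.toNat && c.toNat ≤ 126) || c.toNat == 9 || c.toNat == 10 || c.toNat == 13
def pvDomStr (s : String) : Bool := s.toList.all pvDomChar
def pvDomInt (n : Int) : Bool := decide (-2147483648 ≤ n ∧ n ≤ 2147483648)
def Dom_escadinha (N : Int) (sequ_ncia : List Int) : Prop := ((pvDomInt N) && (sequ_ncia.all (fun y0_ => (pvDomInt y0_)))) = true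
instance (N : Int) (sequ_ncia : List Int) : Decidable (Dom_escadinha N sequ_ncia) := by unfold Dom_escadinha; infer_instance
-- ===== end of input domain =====

-- B replaces A's single index loop with a state variable by a run-stripping two-level loop:
-- the inner while scans to the end of the maximal arithmetic run, the outer loop counts runs; same O(n) cost.

-- ===== PORT A =====
def escadinha (N : Int) (sequ_ncia : List Int) : Int :=
  if N ≤ 2 then 1
  else
    -- diferença_atual, quantidade_de_escadinhas_encontradas carried as the fold state
    ((PySem.List.pyRange 2 N 1).foldl
      (fun (s : Int × Int) valor =>
        if PySem.List.pyGetD sequ_ncia valor 0 - PySem.List.pyGetD sequ_ncia (valor - 1) 0 ≠ s.1 then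
          (PySem.List.pyGetD sequ_ncia valor 0 - PySem.List.pyGetD sequ_ncia (valor - 1) 0, s.2 + 1)
        else s)
      (PySem.List.pyGetD sequ_ncia 1 0 - PySem.List.pyGetD sequ_ncia 0 0, 1)).2

-- ===== PORT B =====
-- the inner while loop 'while j < N and sequência[j] - sequência[j-1] == d: j += 1'
def pvAdvance (seq : List Int) (NB d : Int) (j : Nat) : Nat :=
  if (j : Int) < NB then
    if PySem.List.pyGetD seq (j : Int) 0 - PySem.List.pyGetD seq ((j : Int) - 1) 0 = d then
      pvAdvance seq NB d (j + 1)
    else j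
  else j
termination_by (NB - (j : Int)).toNat
decreasing_by all_goals omega

-- termination fact for the outer loop (cited by decreasing_by below)
theorem pvAdvance_ge (seq : List Int) (NB d : Int) (j : Nat) : j ≤ pvAdvance seq NB d j := by
  rw [pvAdvance]
  split
  · split
    · exact le_trans (Nat.le_succ j) (pvAdvance_ge seq NB d (j + 1))
    · exact le_refl j
  · exact le_refl j
termination_by (NB - (j : Int)).toNat
decreasing_by all_goals omega

-- the outer 'while True' loop, state (início, quantidade); Python exits via 'j == N',
-- written as 'NB ≤ j' (equal to 'j = N' at every reachable state, where j ≤ N holds)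
def pvOuter (seq : List Int) (NB : Int) (start : Nat) (count : Int) : Int :=
  let d := PySem.List.pyGetD seq ((start : Int) + 1) 0 - PySem.List.pyGetD seq (start : Int) 0
  let j := pvAdvance seq NB d (start + 2)
  if NB ≤ (j : Int) then count
  else pvOuter seq NB (j - 1) (count + 1)
termination_by (NB - (start : Int)).toNat
decreasing_by
  have h1 := pvAdvance_ge seq NB d (start + 2)
  have h2 : pvAdvance seq NB d (start + 2)
      = pvAdvance seq NB
          (PySem.List.pyGetD seq ((start : Int) + 1) 0 - PySem.List.pyGetD seq (start : Int) 0)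
          (start + 2) := rfl
  omega

def escadinha_alt (N : Int) (sequ_ncia : List Int) : Int :=
  if N ≤ 2 then 1
  else pvOuter sequ_ncia N 0 1

-- ===== PRECONDITION & SPEC =====
-- Python A indexes sequência[0..N-1] when N ≥ 3, so it raises IndexError unless the list has ≥ N elements.
def Pre_escadinha (N : Int) (sequ_ncia : List Int) : Prop := N ≤ 2 ∨ N ≤ (sequ_ncia.length : Int)
instance (N : Int) (sequ_ncia : List Int) : Decidable (Pre_escadinha N sequ_ncia) := by unfold Pre_escadinha; infer_instance
def pvWitness_escadinha : Int × List Int := (4, [1, 2, 3, 7])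

def Spec_escadinha (N : Int) (sequ_ncia : List Int) (out : Int) : Prop := out = escadinha_alt N sequ_ncia
instance (N : Int) (sequ_ncia : List Int) (out : Int) : Decidable (Spec_escadinha N sequ_ncia out) := by unfold Spec_escadinha; infer_instance

-- ===== CLAIM (what is proved, stated in full; the proofs are below) =====
def Claim_equal_escadinha : Prop := ∀ (N : Int) (sequ_ncia : List Int), Dom_escadinha N sequ_ncia → Pre_escadinha N sequ_ncia → Spec_escadinha N sequ_ncia (escadinha N sequ_ncia)

-- ===== LEMMAS AND PROOFS =====

-- the breakpoint tally both sides are reduced to: count of i in [a,b) with nonzero second difference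
def pvF (seq : List Int) (a b acc : Int) : Int :=
  (PySem.List.pyRange a b 1).foldl
    (fun acc i =>
      if PySem.List.pyGetD seq i 0 - 2 * PySem.List.pyGetD seq (i - 1) 0
          + PySem.List.pyGetD seq (i - 2) 0 ≠ 0 then acc + 1 else acc)
    acc

-- B's counting fold shifts its initial accumulator additively.
theorem pv_foldl_shift (p : Int → Prop) [DecidablePred p] (l : List Int) (c : Int) :
    l.foldl (fun acc i => if p i then acc + 1 else acc) c
      = c + l.foldl (fun acc i => if p i then acc + 1 else acc) 0 := by
  induction l generalizing c with
  | nil => simp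
  | cons x xs ih =>
    simp only [List.foldl_cons]
    by_cases h : p x
    · rw [if_pos h, if_pos h, ih (c + 1), ih (0 + 1)]; ring
    · rw [if_neg h, if_neg h]; exact ih c

theorem pvF_shift (seq : List Int) (a b acc : Int) : pvF seq a b acc = acc + pvF seq a b 0 :=
  pv_foldl_shift _ _ acc

-- A-side invariant: with A's state difference equal to seq[a-1] - seq[a-2], A's counter
-- over range(a, b) advances exactly like the breakpoint tally pvF.
theorem pv_loop_eq (seq : List Int) (a b : Int) (c : Int) :
    ((PySem.List.pyRange a b 1).foldl
      (fun (s : Int × Int) valor =>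
        if PySem.List.pyGetD seq valor 0 - PySem.List.pyGetD seq (valor - 1) 0 ≠ s.1 then
          (PySem.List.pyGetD seq valor 0 - PySem.List.pyGetD seq (valor - 1) 0, s.2 + 1)
        else s)
      (PySem.List.pyGetD seq (a - 1) 0 - PySem.List.pyGetD seq (a - 2) 0, c)).2
    = pvF seq a b c := by
  unfold pvF
  by_cases hab : b ≤ a
  · rw [PySem.List.pyRange_one_eq_nil hab]; rfl
  · push Not at hab
    rw [PySem.List.pyRange_one_cons hab]
    simp only [List.foldl_cons]
    have hcond :
        (PySem.List.pyGetD seq a 0 - PySem.List.pyGetD seq (a - 1) 0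
          ≠ PySem.List.pyGetD seq (a - 1) 0 - PySem.List.pyGetD seq (a - 2) 0)
        ↔ (PySem.List.pyGetD seq a 0 - 2 * PySem.List.pyGetD seq (a - 1) 0
            + PySem.List.pyGetD seq (a - 2) 0 ≠ 0) := by
      constructor <;> intro h h' <;> exact h (by omega)
    have ha1 : a + 1 - 1 = a := by ring
    have ha2 : a + 1 - 2 = a - 1 := by ring
    by_cases h : PySem.List.pyGetD seq a 0 - 2 * PySem.List.pyGetD seq (a - 1) 0
        + PySem.List.pyGetD seq (a - 2) 0 ≠ 0
    · rw [if_pos (hcond.mpr h), if_pos h]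
      have := pv_loop_eq seq (a + 1) b (c + 1)
      unfold pvF at this
      rwa [ha1, ha2] at this
    · rw [if_neg (fun hx => h (hcond.mp hx)), if_neg h]
      have heq : PySem.List.pyGetD seq a 0 - PySem.List.pyGetD seq (a - 1) 0
          = PySem.List.pyGetD seq (a - 1) 0 - PySem.List.pyGetD seq (a - 2) 0 := by
        push Not at h; omega
      have := pv_loop_eq seq (a + 1) b c
      unfold pvF at this
      rw [ha1, ha2] at this
      rw [heq] at this
      exact this
termination_by (b - a).toNat
decreasing_by all_goals omega

-- the inner while loop's postcondition
theorem pvAdvance_spec (seq : List Int) (NB d : Int) (j : Nat) :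
    j ≤ pvAdvance seq NB d j ∧
    ((j : Int) ≤ NB → ((pvAdvance seq NB d j : Nat) : Int) ≤ NB) ∧
    (∀ i : Nat, j ≤ i → i < pvAdvance seq NB d j →
      PySem.List.pyGetD seq (i : Int) 0 - PySem.List.pyGetD seq ((i : Int) - 1) 0 = d) ∧
    (((pvAdvance seq NB d j : Nat) : Int) < NB →
      PySem.List.pyGetD seq ((pvAdvance seq NB d j : Nat) : Int) 0
        - PySem.List.pyGetD seq (((pvAdvance seq NB d j : Nat) : Int) - 1) 0 ≠ d) := by
  by_cases h : (j : Int) < NB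
  · by_cases hd : PySem.List.pyGetD seq (j : Int) 0 - PySem.List.pyGetD seq ((j : Int) - 1) 0 = d
    · have hrec := pvAdvance_spec seq NB d (j + 1)
      rw [pvAdvance, if_pos h, if_pos hd]
      refine ⟨le_trans (Nat.le_succ j) hrec.1, fun _ => hrec.2.1 (by omega), ?_, hrec.2.2.2⟩
      intro i hi1 hi2
      rcases Nat.eq_or_lt_of_le hi1 with rfl | hlt
      · exact hd
      · exact hrec.2.2.1 i (by omega) hi2
    · rw [pvAdvance, if_pos h, if_neg hd]
      exact ⟨le_refl j, fun hle => hle, fun i h1 h2 => absurd h2 (by omega), fun _ => hd⟩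
  · rw [pvAdvance, if_neg h]
    exact ⟨le_refl j, fun hle => hle, fun i h1 h2 => absurd h2 (by omega), fun hlt => absurd hlt h⟩
termination_by (NB - (j : Int)).toNat
decreasing_by all_goals omega

-- pvF is unchanged when all indicators on [a,b) vanish, relative to a tail
theorem pvF_skip (seq : List Int) (a b acc : Int)
    (h : ∀ i : Int, a ≤ i → i < b →
      PySem.List.pyGetD seq i 0 - 2 * PySem.List.pyGetD seq (i - 1) 0
        + PySem.List.pyGetD seq (i - 2) 0 = 0) :
    pvF seq a b acc = acc := by
  by_cases hab : b ≤ a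
  · unfold pvF; rw [PySem.List.pyRange_one_eq_nil hab]; rfl
  · push Not at hab
    unfold pvF
    rw [PySem.List.pyRange_one_cons hab]
    simp only [List.foldl_cons]
    rw [if_neg (by push Not; exact h a le_rfl hab)]
    have := pvF_skip seq (a + 1) b acc (fun i h1 h2 => h i (by omega) h2)
    unfold pvF at this
    exact this
termination_by (b - a).toNat
decreasing_by all_goals omega

-- splitting pvF at a midpoint
theorem pvF_split (seq : List Int) (a m b acc : Int) (h1 : a ≤ m) (h2 : m ≤ b) :
    pvF seq a b acc = pvF seq m b (pvF seq a m acc) := by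
  unfold pvF
  rw [PySem.List.pyRange_one_append a m b h1 h2, List.foldl_append]

-- the outer run-stripping loop computes count + breakpoint tally over [start+2, NB)
theorem pvOuter_eq (seq : List Int) (NB : Int) (start : Nat) (count : Int) :
    pvOuter seq NB start count = count + pvF seq ((start : Int) + 2) NB 0 := by
  rw [pvOuter]
  set d := PySem.List.pyGetD seq ((start : Int) + 1) 0 - PySem.List.pyGetD seq (start : Int) 0
    with hd
  obtain ⟨hge, hle, hrun, hstop⟩ := pvAdvance_spec seq NB d (start + 2)
  set j := pvAdvance seq NB d (start + 2) with hj
  -- the first differences on [start+1, j) all equal d (as Int indices)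
  have hdiff : ∀ i : Int, (start : Int) + 1 ≤ i → i < (j : Int) →
      PySem.List.pyGetD seq i 0 - PySem.List.pyGetD seq (i - 1) 0 = d := by
    intro i h1 hij
    rcases eq_or_lt_of_le h1 with heq | h1'
    · rw [← heq]
      have e : (start : Int) + 1 - 1 = (start : Int) := by ring
      rw [e, hd]
    · have := hrun i.toNat (by omega) (by omega)
      have hi : ((i.toNat : Nat) : Int) = i := by omega
      rwa [hi] at this
  by_cases hNB : NB ≤ (j : Int)
  · rw [if_pos hNB]
    have hzero : pvF seq ((start : Int) + 2) NB 0 = 0 :=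
      pvF_skip seq ((start : Int) + 2) NB 0 (by
        intro i hi1 hi2
        have ha := hdiff i (by omega) (by omega)
        have hb := hdiff (i - 1) (by omega) (by omega)
        have he : i - 1 - 1 = i - 2 := by ring
        rw [he] at hb
        omega)
    rw [hzero]
    ring
  · rw [if_neg hNB]
    push Not at hNB
    -- the breakpoint at j fires
    have hbp : PySem.List.pyGetD seq (j : Int) 0 - 2 * PySem.List.pyGetD seq ((j : Int) - 1) 0
        + PySem.List.pyGetD seq ((j : Int) - 2) 0 ≠ 0 := by
      have hne := hstop hNB
      have hprev : PySem.List.pyGetD seq ((j : Int) - 1) 0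
          - PySem.List.pyGetD seq ((j : Int) - 1 - 1) 0 = d :=
        hdiff ((j : Int) - 1) (by omega) (by omega)
      have he : (j : Int) - 1 - 1 = (j : Int) - 2 := by ring
      rw [he] at hprev
      omega
    have hzero : pvF seq ((start : Int) + 2) (j : Int) 0 = 0 :=
      pvF_skip seq ((start : Int) + 2) (j : Int) 0 (by
        intro i hi1 hi2
        have ha := hdiff i (by omega) hi2
        have hb := hdiff (i - 1) (by omega) (by omega)
        have he : i - 1 - 1 = i - 2 := by ring
        rw [he] at hb
        omega)
    have hsplit : pvF seq ((start : Int) + 2) NB 0 = pvF seq (j : Int) NB 0 := by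
      rw [pvF_split seq ((start : Int) + 2) (j : Int) NB 0 (by omega) (by omega), hzero]
    have hstep : pvF seq (j : Int) NB 0 = 1 + pvF seq ((j : Int) + 1) NB 0 := by
      unfold pvF
      rw [PySem.List.pyRange_one_cons hNB]
      simp only [List.foldl_cons]
      rw [if_pos hbp]
      exact pv_foldl_shift _ _ 1
    have hrec := pvOuter_eq seq NB (j - 1) (count + 1)
    rw [hrec]
    have hm : ((j - 1 : Nat) : Int) + 2 = (j : Int) + 1 := by omega
    rw [hm, hsplit, hstep]
    ring
termination_by (NB - (start : Int)).toNat
decreasing_by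
  have h2 : pvAdvance seq NB d (start + 2)
      = pvAdvance seq NB
          (PySem.List.pyGetD seq ((start : Int) + 1) 0 - PySem.List.pyGetD seq (start : Int) 0)
          (start + 2) := rfl
  omega

-- ===== VERDICT (by name: the statement is the Claim_ definition above) =====
theorem escadinha_spec : Claim_equal_escadinha := by
  intro N seq _ hpre
  unfold Spec_escadinha escadinha escadinha_alt
  by_cases h : N ≤ 2
  · simp [h]
  · rw [if_neg h, if_neg h]
    -- A's loop = breakpoint tally
    have hA := pv_loop_eq seq 2 N 1
    have e1 : (2 : Int) - 1 = 1 := by norm_num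
    have e2 : (2 : Int) - 2 = 0 := by norm_num
    rw [e1, e2] at hA
    rw [hA, pvF_shift, pvOuter_eq seq N 0 1]
    norm_num
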